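-- pv_equiv track=rewrite | github.com/seafooler/bdt | benchmark/logs.py | _merge_nodes_commit
-- ===== SOURCE A (Python) =====
-- def _merge_nodes_commit(input):
--     #单纯的为了合并4个dict，可以偷偷把commit时间算成最早的,同时我们忽略前两个块
--     merged = {}
--     for x in input:
--         for k, (t,n) in x:
--             if not k in merged or merged[k][0] > t:
--                 merged[k] = (t,n)
--     if '0' in merged.keys():
--         merged.pop('0')
--     if '1' in merged.keys():
--         merged.pop('1')
--     return merged
-- ===== SOURCE B (Python) =====
-- def _merge_nodes_commit(input):
--     # group-then-reduce: collect every (t, n) per key, then take the earliest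
--     # (min by time, first-seen wins ties), dropping blocks '0' and '1'
--     groups = {}
--     for x in input:
--         for k, p in x:
--             groups.setdefault(k, []).append(p)
--     return {k: min(g, key=lambda q: q[0])
--             for k, g in groups.items() if k not in ('0', '1')}
-- ===== Notes on version B (the rewrite author's own statement) =====
-- stated objective: simpler
-- what changed: Replaces the incremental compare-and-replace scan over a merged dict with a two-pass group-then-reduce: collect all (t,n) per key into lists, then take min by time (first wins ties) per key in a comprehension that also drops keys '0' and '1'.
import Mathlib
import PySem

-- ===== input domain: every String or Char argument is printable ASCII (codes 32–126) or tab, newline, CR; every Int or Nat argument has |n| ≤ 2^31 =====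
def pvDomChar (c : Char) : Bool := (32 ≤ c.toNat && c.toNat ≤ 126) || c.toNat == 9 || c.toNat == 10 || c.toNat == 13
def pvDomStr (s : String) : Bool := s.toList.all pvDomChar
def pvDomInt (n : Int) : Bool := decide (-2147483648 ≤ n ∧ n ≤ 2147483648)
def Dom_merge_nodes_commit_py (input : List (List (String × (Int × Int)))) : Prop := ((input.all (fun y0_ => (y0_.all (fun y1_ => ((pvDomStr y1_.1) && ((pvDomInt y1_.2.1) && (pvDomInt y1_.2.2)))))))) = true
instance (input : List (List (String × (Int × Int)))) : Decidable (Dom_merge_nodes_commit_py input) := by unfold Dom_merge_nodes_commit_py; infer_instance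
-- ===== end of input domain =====

-- B replaces A's incremental compare-and-replace scan with a two-pass group-then-reduce (simpler decomposition, same cost).

-- ===== PORT A =====
-- one step of A's inner loop: 'if not k in merged or merged[k][0] > t: merged[k] = (t,n)'
def pvStepA (m : PySem.Dict String (Int × Int)) (kp : String × (Int × Int)) : PySem.Dict String (Int × Int) :=
  match m.get? kp.1 with
  | none => m.insert kp.1 kp.2
  | some v => if v.1 > kp.2.1 then m.insert kp.1 kp.2 else m

def merge_nodes_commit_py (input : List (List (String × (Int × Int)))) : List (String × Int × Int) :=
  let merged := input.foldl (fun m x => x.foldl pvStepA m) PySem.Dict.empty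
  let merged := if merged.contains "0" then merged.erase "0" else merged   -- if '0' in merged: merged.pop('0')
  let merged := if merged.contains "1" then merged.erase "1" else merged   -- if '1' in merged: merged.pop('1')
  merged.items

-- ===== PORT B =====
-- groups.setdefault(k, []).append(p)
def pvStepB (d : PySem.Dict String (List (Int × Int))) (kp : String × (Int × Int)) : PySem.Dict String (List (Int × Int)) :=
  d.modify kp.1 [] (· ++ [kp.2])

-- min(g, key=lambda q: q[0]); groups are never empty, so the default is never used
def pvMinT (g : List (Int × Int)) : Int × Int :=
  (PySem.List.min? g (fun q => q.1)).getD (0, 0)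

-- the dict comprehension's items, in groups' insertion order, keeping k not in ('0','1');
-- its keys are distinct (groups' keys are), so these ARE the returned dict's items
def merge_nodes_commit_py_alt (input : List (List (String × (Int × Int)))) : List (String × Int × Int) :=
  let groups := input.foldl (fun d x => x.foldl pvStepB d) PySem.Dict.empty
  (groups.items.filter (fun kg => !(kg.1 == "0" || kg.1 == "1"))).map (fun kg => (kg.1, pvMinT kg.2))

-- ===== PRECONDITION & SPEC =====
def Spec_merge_nodes_commit_py (input : List (List (String × (Int × Int)))) (out : List (String × Int × Int)) : Prop := out = merge_nodes_commit_py_alt input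
instance (input : List (List (String × (Int × Int)))) (out : List (String × Int × Int)) : Decidable (Spec_merge_nodes_commit_py input out) := by unfold Spec_merge_nodes_commit_py; infer_instance

-- ===== CLAIM (what is proved, stated in full; the proofs are below) =====
def Claim_equal_merge_nodes_commit_py : Prop := ∀ (input : List (List (String × (Int × Int)))), Dom_merge_nodes_commit_py input → Spec_merge_nodes_commit_py input (merge_nodes_commit_py input)

-- ===== LEMMAS AND PROOFS =====

-- invariant: A's merged dict is the image of B's groups dict under per-group minimisation
def pvInv (dA : PySem.Dict String (Int × Int)) (dB : PySem.Dict String (List (Int × Int))) : Prop :=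
  dA.items = dB.items.map (fun kg => (kg.1, pvMinT kg.2)) ∧ dB.keys.Nodup ∧ ∀ kg ∈ dB.items, kg.2 ≠ []

lemma pvMinT_append (g : List (Int × Int)) (p : Int × Int) (hg : g ≠ []) :
    pvMinT (g ++ [p]) = if (pvMinT g).1 > p.1 then p else pvMinT g := by
  obtain ⟨m, hm⟩ : ∃ m, PySem.List.min? g (fun q => q.1) = some m := by
    cases hx : PySem.List.min? g (fun q => q.1) with
    | none => exact absurd ((PySem.List.min?_eq_none_iff _ _).mp hx) hg
    | some m => exact ⟨m, rfl⟩
  have h1 : PySem.List.min? (g ++ [p]) (fun q => q.1) =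
      if p.1 < m.1 then some p else some m := by
    simp [PySem.List.min?, List.foldl_append]
    simp only [PySem.List.min?] at hm
    rw [hm]
  simp only [pvMinT, h1, hm, Option.getD_some, gt_iff_lt]
  split_ifs with h <;> simp

lemma pvInv_step (dA : PySem.Dict String (Int × Int)) (dB : PySem.Dict String (List (Int × Int)))
    (kp : String × (Int × Int)) (h : pvInv dA dB) : pvInv (pvStepA dA kp) (pvStepB dB kp) := by
  obtain ⟨hit, hnd, hne⟩ := h
  obtain ⟨k, p⟩ := kp
  have hkeys : dA.keys = dB.keys := by
    simp only [PySem.Dict.keys, hit, List.map_map]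
    rfl
  have hndA : dA.keys.Nodup := hkeys ▸ hnd
  by_cases hc : dB.contains k = true
  · -- key already present in groups
    have hkmem : k ∈ dB.keys := (PySem.Dict.contains_iff_mem_keys dB k).mp hc
    obtain ⟨⟨k', g⟩, hmem, hk'⟩ :=
      List.mem_map.mp (show k ∈ dB.items.map (·.1) by simpa [PySem.Dict.keys] using hkmem)
    subst hk'
    have hg : (k', g) ∈ dB.items := hmem
    have hgetD : dB.getD k' [] = g := PySem.Dict.getD_of_mem_items dB hg hnd []
    have hgne : g ≠ [] := hne _ hg
    have hgetA : dA.get? k' = some (pvMinT g) :=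
      PySem.Dict.get?_of_mem_items dA (hit ▸ List.mem_map_of_mem hg) hndA
    have hcA : dA.contains k' = true := by
      rw [PySem.Dict.contains_iff_mem_keys, hkeys]
      exact (PySem.Dict.contains_iff_mem_keys dB k').mp hc
    have hB : pvStepB dB (k', p) = dB.insert k' (g ++ [p]) := by
      simp [pvStepB, PySem.Dict.modify, hgetD]
    have hBitems : (pvStepB dB (k', p)).items =
        dB.items.map (fun q => if q.1 == k' then (k', g ++ [p]) else q) := by
      rw [hB]; exact PySem.Dict.items_insert_of_contains dB _ hc
    have hBkeys : (pvStepB dB (k', p)).keys.Nodup := by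
      rw [hB]; exact PySem.Dict.nodup_keys_insert dB _ _ hnd
    have hBne : ∀ kg ∈ (pvStepB dB (k', p)).items, kg.2 ≠ [] := by
      intro kg hkg
      rw [hBitems] at hkg
      obtain ⟨q, hq, hqe⟩ := List.mem_map.mp hkg
      by_cases hq1 : q.1 == k'
      · rw [if_pos hq1] at hqe; subst hqe; simp
      · rw [if_neg hq1] at hqe
        exact hqe ▸ hne q hq
    refine ⟨?_, hBkeys, hBne⟩
    simp only [pvStepA, hgetA]
    by_cases hlt : (pvMinT g).1 > p.1
    · rw [if_pos hlt]
      rw [PySem.Dict.items_insert_of_contains dA _ hcA, hit, hBitems,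
          List.map_map, List.map_map]
      apply List.map_congr_left
      intro q hq
      by_cases hq1 : q.1 == k'
      · have : q = (k', g) := by
          have := PySem.Dict.get?_of_mem_items dB (show (q.1, q.2) ∈ dB.items from hq) hnd
          rw [eq_of_beq hq1, PySem.Dict.get?_of_mem_items dB hg hnd] at this
          have h2 := Option.some.inj this
          exact Prod.ext (eq_of_beq hq1) h2.symm
        subst this
        simp [pvMinT_append g p hgne, hlt]
      · simp only [Function.comp]
        simp [hq1]
    · rw [if_neg hlt, hit, hBitems, List.map_map]
      apply List.map_congr_left
      intro q hq
      by_cases hq1 : q.1 == k'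
      · have : q = (k', g) := by
          have := PySem.Dict.get?_of_mem_items dB (show (q.1, q.2) ∈ dB.items from hq) hnd
          rw [eq_of_beq hq1, PySem.Dict.get?_of_mem_items dB hg hnd] at this
          have h2 := Option.some.inj this
          exact Prod.ext (eq_of_beq hq1) h2.symm
        subst this
        simp [pvMinT_append g p hgne, hlt]
      · simp [Function.comp, hq1]
  · -- fresh key
    have hcB : dB.contains k = false := by simpa using hc
    have hcA : dA.contains k = false := by
      rw [← Bool.not_eq_true, PySem.Dict.contains_iff_mem_keys, hkeys]
      simpa [PySem.Dict.contains_iff_mem_keys] using hc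
    have hgetA : dA.get? k = none := by
      rw [PySem.Dict.get?_eq_none_iff_not_mem_keys, hkeys]
      simpa [PySem.Dict.contains_iff_mem_keys] using hc
    have hB : pvStepB dB (k, p) = dB.insert k [p] := by
      simp [pvStepB, PySem.Dict.modify, PySem.Dict.getD_of_not_contains dB _ hcB]
    refine ⟨?_, ?_, ?_⟩
    · simp only [pvStepA, hgetA, hB]
      rw [PySem.Dict.items_insert_of_not_contains dA _ hcA,
          PySem.Dict.items_insert_of_not_contains dB _ hcB, hit, List.map_append]
      rfl
    · rw [hB]; exact PySem.Dict.nodup_keys_insert dB _ _ hnd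
    · intro kg hkg
      rw [hB] at hkg
      rw [PySem.Dict.items_insert_of_not_contains dB _ hcB] at hkg
      rcases List.mem_append.mp hkg with h1 | h1
      · exact hne _ h1
      · simp only [List.mem_singleton] at h1; subst h1; simp

lemma pvInv_foldl (l : List (String × (Int × Int))) (dA : PySem.Dict String (Int × Int))
    (dB : PySem.Dict String (List (Int × Int))) (h : pvInv dA dB) :
    pvInv (l.foldl pvStepA dA) (l.foldl pvStepB dB) := by
  induction l generalizing dA dB with
  | nil => exact h
  | cons kp t ih => exact ih _ _ (pvInv_step _ _ kp h)

lemma pvErase_items (d : PySem.Dict String (Int × Int)) (k : String) :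
    (if d.contains k then d.erase k else d).items = d.items.filter (fun p => !(p.1 == k)) := by
  split_ifs with hc
  · rfl
  · symm
    apply List.filter_eq_self.mpr
    intro p hp
    simp only [Bool.not_eq_eq_eq_not, Bool.not_true, beq_eq_false_iff_ne]
    intro hpk
    exact hc ((PySem.Dict.contains_iff_mem_keys d k).mpr
      (hpk ▸ List.mem_map_of_mem hp))

-- ===== VERDICT (by name: the statement is the Claim_ definition above) =====
theorem merge_nodes_commit_py_spec : Claim_equal_merge_nodes_commit_py := by
  intro input _
  show merge_nodes_commit_py input = merge_nodes_commit_py_alt input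
  simp only [merge_nodes_commit_py, merge_nodes_commit_py_alt, ← List.foldl_flatten]
  obtain ⟨hit, hnd, hne⟩ := pvInv_foldl input.flatten PySem.Dict.empty PySem.Dict.empty
    ⟨rfl, by simp [PySem.Dict.keys, PySem.Dict.empty], by simp [PySem.Dict.empty]⟩
  rw [pvErase_items, pvErase_items, List.filter_filter, hit, List.filter_map]
  congr 1
  apply List.filter_congr
  intro a _
  by_cases h0 : a.1 == "0" <;> by_cases h1 : a.1 == "1" <;> simp [Function.comp, h0, h1]
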